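-- pv_equiv track=rewrite | github.com/JengTallis/cipher | cipher.py | cipher_matrix
-- ===== SOURCE A (Python) =====
-- import math
--
-- def cipher_matrix(key, p):
-- 	w = len(key)
-- 	h = math.ceil(len(p)/len(key))
-- 	mat = [['' for i in range(w)] for j in range(h)]
-- 	for x in range(len(p)):
-- 		j = math.floor(x/len(key))
-- 		i = x % len(key)
-- 		mat[j][i] = p[x]
-- 	return mat
-- ===== SOURCE B (Python) =====
-- import math
--
-- def cipher_matrix(key, p):
--     w = len(key)
--     h = math.ceil(len(p) / len(key))
--     mat = []
--     for j in range(h):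
--         row = list(p[j * w:(j + 1) * w])
--         row += [''] * (w - len(row))
--         mat.append(row)
--     return mat
-- ===== Notes on version B (the rewrite author's own statement) =====
-- stated objective: simpler
-- what changed: Replaces the per-character index-scatter into a preallocated matrix by building each row directly as the slice p[j*w:(j+1)*w] padded with '' to width w.
import Mathlib
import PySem

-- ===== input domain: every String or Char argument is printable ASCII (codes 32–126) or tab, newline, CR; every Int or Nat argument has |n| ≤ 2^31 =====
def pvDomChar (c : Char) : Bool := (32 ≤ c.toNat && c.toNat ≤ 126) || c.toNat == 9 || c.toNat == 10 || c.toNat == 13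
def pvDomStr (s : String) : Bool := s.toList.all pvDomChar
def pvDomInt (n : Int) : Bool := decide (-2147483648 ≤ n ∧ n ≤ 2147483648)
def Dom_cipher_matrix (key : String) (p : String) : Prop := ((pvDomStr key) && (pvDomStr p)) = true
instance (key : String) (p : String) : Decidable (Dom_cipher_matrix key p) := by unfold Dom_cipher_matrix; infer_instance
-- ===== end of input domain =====

-- B builds each row by slicing and padding instead of A's per-character index scatter (objective: simpler).

-- ===== PORT A =====
-- mat = [['' for i in range(w)] for j in range(h)]; then mat[x//w][x%w] = p[x] for each x.
-- h = math.ceil(len(p)/len(key)): exact as Nat ceiling division (w > 0 inside Pre_).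
def cipher_matrix (key : String) (p : String) : List (List String) :=
  let w := key.toList.length
  let h := (p.toList.length + w - 1) / w
  let mat := List.replicate h (List.replicate w "")
  (List.range p.toList.length).foldl
    (fun mat x =>
      let j := x / w
      let i := x % w
      mat.modify j (fun row => row.set i (String.singleton (p.toList.getD x ' '))))
    mat

-- ===== PORT B =====
-- row j = list(p[j*w:(j+1)*w]) padded with '' to width w; a slice with these
-- nonnegative bounds is exactly (drop (j*w)).take w (PySem.List.slice_natCast_add).
def cipher_matrix_alt (key : String) (p : String) : List (List String) :=
  let w := key.toList.length
  let h := (p.toList.length + w - 1) / w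
  (List.range h).map (fun j =>
    let row := ((p.toList.drop (j * w)).take w).map String.singleton
    row ++ List.replicate (w - row.length) "")

-- ===== PRECONDITION & SPEC =====
-- Pre_ excludes only the empty key, on which A raises ZeroDivisionError (len(p)/len(key)).
def Pre_cipher_matrix (key : String) (p : String) : Prop := key ≠ ""
instance (key : String) (p : String) : Decidable (Pre_cipher_matrix key p) := by unfold Pre_cipher_matrix; infer_instance
def pvWitness_cipher_matrix : String × String := ("abc", "hello")

def Spec_cipher_matrix (key : String) (p : String) (out : List (List String)) : Prop := out = cipher_matrix_alt key p
instance (key : String) (p : String) (out : List (List String)) : Decidable (Spec_cipher_matrix key p out) := by unfold Spec_cipher_matrix; infer_instance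

-- ===== CLAIM (what is proved, stated in full; the proofs are below) =====
def Claim_equal_cipher_matrix : Prop := ∀ (key : String) (p : String), Dom_cipher_matrix key p → Pre_cipher_matrix key p → Spec_cipher_matrix key p (cipher_matrix key p)

-- ===== LEMMAS AND PROOFS =====

-- the common shape: entry (j,i) is p[j*w+i] if that index is below m, else ""
def pvSpecMat (cs : List Char) (w m : Nat) : List (List String) :=
  (List.range ((cs.length + w - 1) / w)).map (fun j =>
    (List.range w).map (fun i =>
      if j * w + i < m then String.singleton (cs.getD (j * w + i) ' ') else ""))

lemma pvSpecMat_zero (cs : List Char) (w : Nat) :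
    List.replicate ((cs.length + w - 1) / w) (List.replicate w "") = pvSpecMat cs w 0 := by
  unfold pvSpecMat
  apply List.ext_getElem <;> simp

lemma pvSpecMat_step (cs : List Char) (w m : Nat) (hw : 0 < w) :
    (pvSpecMat cs w m).modify (m / w)
      (fun row => row.set (m % w) (String.singleton (cs.getD m ' ')))
      = pvSpecMat cs w (m + 1) := by
  have hdm := Nat.div_add_mod m w
  have e1 : m / w * w + m % w = m := by rw [Nat.mul_comm]; exact hdm
  have hml := Nat.mod_lt m hw
  apply List.ext_getElem
  · simp [pvSpecMat]
  intro j hj hj'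
  simp only [pvSpecMat, List.getElem_modify, List.getElem_map, List.getElem_range]
  by_cases h : m / w = j
  · rw [if_pos h]; subst h
    apply List.ext_getElem
    · simp
    intro i hi hi'
    have hiw : i < w := by simpa using hi'
    simp only [List.getElem_set, List.getElem_map, List.getElem_range]
    by_cases h2 : m % w = i
    · rw [if_pos h2]; subst h2
      rw [e1, if_pos (by omega)]
    · rw [if_neg h2]
      by_cases h3 : m / w * w + i < m
      · rw [if_pos h3, if_pos (by omega)]
      · rw [if_neg h3, if_neg (by omega)]
  · rw [if_neg h]
    apply List.ext_getElem
    · simp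
    intro i hi hi'
    have hiw : i < w := by simpa using hi'
    simp only [List.getElem_map, List.getElem_range]
    have hne : j * w + i ≠ m := by
      intro he
      refine h ?_
      rw [← he, Nat.mul_comm j w, Nat.mul_add_div hw, Nat.div_eq_of_lt hiw]
      omega
    by_cases h3 : j * w + i < m
    · rw [if_pos h3, if_pos (by omega)]
    · rw [if_neg h3, if_neg (by omega)]

lemma pv_fold_spec (cs : List Char) (w m : Nat) (hw : 0 < w) :
    (List.range m).foldl
      (fun mat x =>
        mat.modify (x / w) (fun row => row.set (x % w) (String.singleton (cs.getD x ' '))))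
      (List.replicate ((cs.length + w - 1) / w) (List.replicate w ""))
      = pvSpecMat cs w m := by
  induction m with
  | zero => simpa using pvSpecMat_zero cs w
  | succ k ih =>
    rw [List.range_succ, List.foldl_append, ih, List.foldl_cons, List.foldl_nil]
    exact pvSpecMat_step cs w k hw

lemma pv_alt_spec (cs : List Char) (w : Nat) (hw : 0 < w) :
    (List.range ((cs.length + w - 1) / w)).map (fun j =>
      let row := ((cs.drop (j * w)).take w).map String.singleton
      row ++ List.replicate (w - row.length) "")
      = pvSpecMat cs w cs.length := by
  unfold pvSpecMat
  apply List.ext_getElem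
  · simp
  intro j hj hj'
  simp only [List.getElem_map, List.getElem_range]
  have hjh : j < (cs.length + w - 1) / w := by simpa using hj
  have hjw : j * w < cs.length := by
    have h1 : ((cs.length + w - 1) / w) * w ≤ cs.length + w - 1 := Nat.div_mul_le_self _ _
    have h2 : (j + 1) * w ≤ ((cs.length + w - 1) / w) * w := Nat.mul_le_mul_right w hjh
    have h3 : (j + 1) * w = j * w + w := by ring
    omega
  have hlen : (((cs.drop (j * w)).take w).map String.singleton).length
      = min w (cs.length - j * w) := by simp
  apply List.ext_getElem
  · simp
  intro i hi hi'
  have hiw : i < w := by simpa using hi'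
  simp only [List.getElem_map, List.getElem_range]
  by_cases hc : i < min w (cs.length - j * w)
  · rw [List.getElem_append_left (by omega)]
    simp only [List.getElem_map, List.getElem_take, List.getElem_drop]
    have hlt : j * w + i < cs.length := by omega
    rw [if_pos hlt, List.getD_eq_getElem _ _ hlt]
  · rw [List.getElem_append_right (by omega), List.getElem_replicate, if_neg (by omega)]

-- ===== VERDICT (by name: the statement is the Claim_ definition above) =====
theorem cipher_matrix_spec : Claim_equal_cipher_matrix := by
  intro key p _ hpre
  have hw : 0 < key.toList.length := by
    rw [List.length_pos_iff]
    intro h0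
    exact hpre (String.toList_inj.mp (by rw [h0]; rfl))
  show cipher_matrix key p = cipher_matrix_alt key p
  unfold cipher_matrix cipher_matrix_alt
  rw [pv_fold_spec p.toList key.toList.length p.toList.length hw]
  rw [pv_alt_spec p.toList key.toList.length hw]
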